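-- pv_equiv track=rewrite | github.com/RisPNG/pycro-station | pycros/Export--Bill--Sorter/main.py | header_index_prefer_exact
-- ===== SOURCE A (Python) =====
-- from typing import Callable, Iterable, Optional
--
-- def header_indices(header_row: Iterable, name: str) -> list[int]:
--     target = name.strip().upper()
--     out: list[int] = []
--     for idx, v in enumerate(header_row):
--         if v is None:
--             continue
--         if str(v).strip().upper() == target:
--             out.append(idx)
--     return out
--
-- def header_index_prefer_exact(header_row: Iterable, exact_text: str) -> Optional[int]:
--     """Find a header column index, preferring an exact (case-sensitive) match, else case-insensitive."""
--     exact = exact_text.strip()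
--     for idx, v in enumerate(header_row):
--         if v is None:
--             continue
--         if str(v).strip() == exact:
--             return idx
--     matches = header_indices(header_row, exact_text)
--     return matches[0] if matches else None
-- ===== SOURCE B (Python) =====
-- from typing import Iterable, Optional
--
-- def header_index_prefer_exact(header_row: Iterable, exact_text: str) -> Optional[int]:
--     """One pass: exact match wins immediately; first case-insensitive match kept as fallback."""
--     exact = exact_text.strip()
--     target = exact.upper()
--     ci: Optional[int] = None
--     for idx, v in enumerate(header_row):
--         if v is None:
--             continue
--         s = str(v).strip()
--         if s == exact:
--             return idx
--         if ci is None and s.upper() == target: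
--             ci = idx
--     return ci
-- ===== Notes on version B (the rewrite author's own statement) =====
-- stated objective: alternative
-- what changed: Replaces A's two scans (exact-match loop plus a header_indices rescan that collects ALL case-insensitive matches into a list) with a single pass that returns on the first exact match and keeps only the first case-insensitive index as a fallback.
import Mathlib
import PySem

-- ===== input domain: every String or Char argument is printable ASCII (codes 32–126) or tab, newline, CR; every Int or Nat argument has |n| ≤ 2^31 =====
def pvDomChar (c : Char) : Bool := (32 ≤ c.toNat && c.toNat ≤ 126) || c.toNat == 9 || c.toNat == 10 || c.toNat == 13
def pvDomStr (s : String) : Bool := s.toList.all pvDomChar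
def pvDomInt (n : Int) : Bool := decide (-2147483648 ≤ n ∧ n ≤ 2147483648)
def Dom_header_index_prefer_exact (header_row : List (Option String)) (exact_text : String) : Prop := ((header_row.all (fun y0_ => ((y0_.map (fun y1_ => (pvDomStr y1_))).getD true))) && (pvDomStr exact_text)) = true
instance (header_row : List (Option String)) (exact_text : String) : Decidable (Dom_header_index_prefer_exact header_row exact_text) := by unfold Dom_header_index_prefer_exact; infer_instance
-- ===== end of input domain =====

-- B replaces A's two scans (exact loop + a full header_indices rescan) with a single pass keeping a fallback candidate (objective: alternative decomposition).

-- ===== PORT A =====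
-- A's first loop: return the index of the first exact (case-sensitive) stripped match.
def pvA_exactLoop : List (Option String) → String → Int → Option Int
  | [], _, _ => none
  | v :: rest, exact, idx =>
    match v with
    | none => pvA_exactLoop rest exact (idx + 1)
    | some s =>
      if PySem.Str.strip s = exact then some idx
      else pvA_exactLoop rest exact (idx + 1)

-- helper header_indices: collect ALL indices whose stripped-uppercased cell equals target.
def pvA_indicesLoop : List (Option String) → String → Int → List Int
  | [], _, _ => []
  | v :: rest, target, idx =>
    match v with
    | none => pvA_indicesLoop rest target (idx + 1)
    | some s =>
      if PySem.Str.upper (PySem.Str.strip s) = target then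
        idx :: pvA_indicesLoop rest target (idx + 1)
      else pvA_indicesLoop rest target (idx + 1)

def header_indices (header_row : List (Option String)) (name : String) : List Int :=
  pvA_indicesLoop header_row (PySem.Str.upper (PySem.Str.strip name)) 0

def header_index_prefer_exact (header_row : List (Option String)) (exact_text : String) : Option Int :=
  let exact := PySem.Str.strip exact_text
  match pvA_exactLoop header_row exact 0 with
  | some i => some i
  | none =>
    let ms := header_indices header_row exact_text
    match ms with
    | m :: _ => some m
    | [] => none

-- ===== PORT B =====
-- B's single loop: return on the first exact match, remember the first case-insensitive match in ci.
def pvB_loop : List (Option String) → String → String → Int → Option Int → Option Int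
  | [], _, _, _, ci => ci
  | v :: rest, exact, target, idx, ci =>
    match v with
    | none => pvB_loop rest exact target (idx + 1) ci
    | some s0 =>
      let s := PySem.Str.strip s0
      if s = exact then some idx
      else
        let ci' := if ci = none ∧ PySem.Str.upper s = target then some idx else ci
        pvB_loop rest exact target (idx + 1) ci'

def header_index_prefer_exact_alt (header_row : List (Option String)) (exact_text : String) : Option Int :=
  let exact := PySem.Str.strip exact_text
  let target := PySem.Str.upper exact
  pvB_loop header_row exact target 0 none

-- ===== PRECONDITION & SPEC =====
def Spec_header_index_prefer_exact (header_row : List (Option String)) (exact_text : String) (out : Option Int) : Prop := out = header_index_prefer_exact_alt header_row exact_text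
instance (header_row : List (Option String)) (exact_text : String) (out : Option Int) : Decidable (Spec_header_index_prefer_exact header_row exact_text out) := by unfold Spec_header_index_prefer_exact; infer_instance

-- ===== CLAIM (what is proved, stated in full; the proofs are below) =====
def Claim_equal_header_index_prefer_exact : Prop := ∀ (header_row : List (Option String)) (exact_text : String), Dom_header_index_prefer_exact header_row exact_text → Spec_header_index_prefer_exact header_row exact_text (header_index_prefer_exact header_row exact_text)

-- ===== LEMMAS AND PROOFS =====

-- Invariant of B's loop: it equals "first exact match, else stored candidate, else head of A's remaining CI indices".
theorem pvB_loop_eq (hr : List (Option String)) (exact target : String) :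
    ∀ (idx : Int) (ci : Option Int),
      pvB_loop hr exact target idx ci =
        match pvA_exactLoop hr exact idx with
        | some i => some i
        | none =>
          match ci with
          | some c => some c
          | none => (pvA_indicesLoop hr target idx).head? := by
  induction hr with
  | nil => intro idx ci; cases ci <;> simp [pvB_loop, pvA_exactLoop, pvA_indicesLoop]
  | cons v rest ih =>
    intro idx ci
    cases v with
    | none => simpa [pvB_loop, pvA_exactLoop, pvA_indicesLoop] using ih (idx + 1) ci
    | some s =>
      by_cases he : PySem.Str.strip s = exact
      · simp [pvB_loop, pvA_exactLoop, he]
      · have hbu := ih (idx + 1)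
        by_cases hu : PySem.Str.upper (PySem.Str.strip s) = target
        · cases ci with
          | some c =>
            simp only [pvB_loop, pvA_exactLoop, he, hu]
            simpa using hbu (some c)
          | none =>
            simp [pvB_loop, pvA_exactLoop, pvA_indicesLoop, he, hu, hbu (some idx)]
        · cases ci with
          | some c =>
            simp only [pvB_loop, pvA_exactLoop, he, hu]
            simpa using hbu (some c)
          | none =>
            simp only [pvB_loop, pvA_exactLoop, pvA_indicesLoop, he, hu]
            simpa using hbu none

-- ===== VERDICT (by name: the statement is the Claim_ definition above) =====
theorem header_index_prefer_exact_spec : Claim_equal_header_index_prefer_exact := by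
  intro header_row exact_text _
  unfold Spec_header_index_prefer_exact header_index_prefer_exact header_index_prefer_exact_alt header_indices
  rw [pvB_loop_eq header_row (PySem.Str.strip exact_text)
        (PySem.Str.upper (PySem.Str.strip exact_text)) 0 none]
  cases h : pvA_exactLoop header_row (PySem.Str.strip exact_text) 0 with
  | some i => simp [h]
  | none =>
    cases pvA_indicesLoop header_row (PySem.Str.upper (PySem.Str.strip exact_text)) 0 <;>
      simp [h]
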